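-- pv_equiv track=rewrite | github.com/minhluan96/leetcode-practice | leetcode/src/bigocoding/algorithm_complexity/sereja_and_dima.py | serajaAndDima
-- ===== SOURCE A (Python) =====
-- def serajaAndDima(n, nums):
--     left, right = 0, n - 1
--
--     count = 0
--     totalSeraja, totalDima = 0, 0
--
--     while left < right:
--         maxNum = max(nums[left], nums[right])
--
--         if count % 2 == 0:
--             totalSeraja += maxNum
--         else:
--             totalDima += maxNum
--
--         if nums[left] < nums[right]:
--             right -= 1
--         else:
--             left += 1
--
--         count += 1
--
--     '''
--     leftover
--     '''
--     if count % 2 == 0: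
--         totalSeraja += nums[left]
--     else:
--         totalDima += nums[left]
--
--     return [totalSeraja, totalDima]
-- ===== SOURCE B (Python) =====
-- def serajaAndDima(n, nums):
--     # Role-swapping evaluation from the game's end, via an explicit stack:
--     # phase 1 pushes each taken card; phase 2 unwinds the game backwards,
--     # each pop adding the card to the then-mover's total and swapping roles.
--     # No turn parity and no per-player running sums during the game.
--     stack = []
--     lo, hi = 0, n - 1
--     while lo < hi:
--         if nums[lo] >= nums[hi]:
--             stack.append(nums[lo])
--             lo += 1
--         else:
--             stack.append(nums[hi])
--             hi -= 1
--     me, other = nums[lo], 0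
--     while stack:
--         me, other = stack.pop() + other, me
--     return [me, other]
-- ===== Notes on version B (the rewrite author's own statement) =====
-- stated objective: alternative
-- what changed: B drops A's turn counter and the two per-player running totals: it pushes each taken card on a stack and then evaluates the game backwards, popping cards while swapping a (mover, opponent) pair of totals, so the even/odd assignment never appears.
import Mathlib
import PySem

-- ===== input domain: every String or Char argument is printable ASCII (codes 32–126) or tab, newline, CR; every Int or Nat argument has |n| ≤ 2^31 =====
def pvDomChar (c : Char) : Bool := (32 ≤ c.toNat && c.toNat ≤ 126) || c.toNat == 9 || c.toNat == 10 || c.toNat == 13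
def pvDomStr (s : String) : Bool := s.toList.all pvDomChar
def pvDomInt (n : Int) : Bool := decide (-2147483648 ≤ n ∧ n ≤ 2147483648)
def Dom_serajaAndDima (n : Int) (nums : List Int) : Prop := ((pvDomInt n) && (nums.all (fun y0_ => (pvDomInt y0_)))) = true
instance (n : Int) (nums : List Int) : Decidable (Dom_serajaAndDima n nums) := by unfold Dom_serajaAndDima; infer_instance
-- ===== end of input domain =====

-- B replaces A's iterative turn-counter/two-running-totals loop by a role-swapping
-- recursion from the game's end (objective: alternative, same cost).

-- ===== PORT A =====
-- A's while loop as structural recursion on a fuel = (right - left).toNat, which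
-- bounds the number of iterations exactly; state (left, right, count, totalSeraja,
-- totalDima); none = an IndexError of nums[left]/nums[right]
def loopA (nums : List Int) (fuel : Nat) (left right count totalSeraja totalDima : Int) :
    Option (List Int) :=
  match fuel with
  | .succ fuel =>
    if left < right then
      match PySem.List.pyGet? nums left, PySem.List.pyGet? nums right with
      | some a, some b =>
        let maxNum := max a b
        let totalSeraja' := if count % 2 = 0 then totalSeraja + maxNum else totalSeraja
        let totalDima' := if count % 2 = 0 then totalDima else totalDima + maxNum
        if a < b then loopA nums fuel left (right - 1) (count + 1) totalSeraja' totalDima'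
        else loopA nums fuel (left + 1) right (count + 1) totalSeraja' totalDima'
      | _, _ => none
    else
      match PySem.List.pyGet? nums left with
      | some v =>
        some (if count % 2 = 0 then [totalSeraja + v, totalDima] else [totalSeraja, totalDima + v])
      | none => none
  | .zero =>
    if left < right then none   -- unreachable at fuel = (right - left).toNat
    else
      match PySem.List.pyGet? nums left with
      | some v =>
        some (if count % 2 = 0 then [totalSeraja + v, totalDima] else [totalSeraja, totalDima + v])
      | none => none

def serajaAndDima (n : Int) (nums : List Int) : List Int :=
  (loopA nums (n - 1).toNat 0 (n - 1) 0 0 0).getD []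

-- ===== PORT B =====
-- phase 1 of B: the first while loop, fuel = (hi - lo).toNat bounds its iterations
-- exactly; pushes each taken card on `stack`; none = IndexError;
-- returns (the stack, nums[lo] at loop exit)
def descendB (nums : List Int) (fuel : Nat) (lo hi : Int) (stack : List Int) :
    Option (List Int × Int) :=
  match fuel with
  | .succ fuel =>
    if lo < hi then
      match PySem.List.pyGet? nums lo, PySem.List.pyGet? nums hi with
      | some a, some b =>
        if a ≥ b then descendB nums fuel (lo + 1) hi (stack ++ [a])
        else descendB nums fuel lo (hi - 1) (stack ++ [b])
      | _, _ => none
    else (PySem.List.pyGet? nums lo).map (fun v => (stack, v))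
  | .zero =>
    if lo < hi then none   -- unreachable at fuel = (hi - lo).toNat
    else (PySem.List.pyGet? nums lo).map (fun v => (stack, v))

-- phase 2 of B: the pop loop; popping from the stack's end = consuming the
-- reversed stack front to back, each step (me, other) := (card + other, me)
def popLoopB : List Int → Int × Int → Int × Int
  | [], p => p
  | c :: t, p => popLoopB t (c + p.2, p.1)

def serajaAndDima_alt (n : Int) (nums : List Int) : List Int :=
  match descendB nums (n - 1).toNat 0 (n - 1) [] with
  | some (stack, v) =>
    let p := popLoopB stack.reverse (v, 0)
    [p.1, p.2]
  | none => []

-- ===== PRECONDITION & SPEC =====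
-- exactly the inputs on which Python A returns (otherwise nums[left]/nums[right]
-- raises IndexError)
def Pre_serajaAndDima (n : Int) (nums : List Int) : Prop :=
  nums ≠ [] ∧ n ≤ nums.length
instance (n : Int) (nums : List Int) : Decidable (Pre_serajaAndDima n nums) := by
  unfold Pre_serajaAndDima; infer_instance

def pvWitness_serajaAndDima : Int × List Int := (5, [4, 1, 2, 10, 7])

def Spec_serajaAndDima (n : Int) (nums : List Int) (out : List Int) : Prop := out = serajaAndDima_alt n nums
instance (n : Int) (nums : List Int) (out : List Int) : Decidable (Spec_serajaAndDima n nums out) := by unfold Spec_serajaAndDima; infer_instance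

-- ===== CLAIM (what is proved, stated in full; the proofs are below) =====
def Claim_equal_serajaAndDima : Prop := ∀ (n : Int) (nums : List Int), Dom_serajaAndDima n nums → Pre_serajaAndDima n nums → Spec_serajaAndDima n nums (serajaAndDima n nums)

-- ===== LEMMAS AND PROOFS =====

-- proof-only helper: the game's value as a role-swapping pair
-- (mover's total, opponent's total) from position (lo, hi)
def playB (nums : List Int) (fuel : Nat) (lo hi : Int) : Option (Int × Int) :=
  match fuel with
  | .succ fuel =>
    if lo < hi then
      match PySem.List.pyGet? nums lo, PySem.List.pyGet? nums hi with
      | some a, some b =>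
        if a ≥ b then (playB nums fuel (lo + 1) hi).map (fun p => (a + p.2, p.1))
        else (playB nums fuel lo (hi - 1)).map (fun p => (b + p.2, p.1))
      | _, _ => none
    else (PySem.List.pyGet? nums lo).map (fun v => (v, 0))
  | .zero =>
    if lo < hi then none
    else (PySem.List.pyGet? nums lo).map (fun v => (v, 0))

-- A's loop state (count, totals) is exactly the role-swapped pair: the parity of
-- `count` decides which component of playB's pair lands on which total.
theorem loopA_eq_playB (nums : List Int) (fuel : Nat) :
    ∀ (l r c tS tD : Int),
      loopA nums fuel l r c tS tD = (playB nums fuel l r).map (fun p =>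
        if c % 2 = 0 then [tS + p.1, tD + p.2] else [tS + p.2, tD + p.1]) := by
  induction fuel with
  | zero =>
    intro l r c tS tD
    rw [loopA, playB]
    by_cases hl : l < r
    · simp [hl]
    · simp only [if_neg hl]
      cases PySem.List.pyGet? nums l <;> simp
  | succ fuel ih =>
    intro l r c tS tD
    rw [loopA, playB]
    by_cases hl : l < r
    · simp only [if_pos hl]
      cases ha : PySem.List.pyGet? nums l <;> cases hb : PySem.List.pyGet? nums r <;> simp
      rename_i a b
      by_cases hab : a < b
      · have hmax : max a b = b := by omega
        rw [if_pos hab, if_neg (by omega : ¬ a ≥ b), ih l (r - 1) (c + 1)]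
        cases playB nums fuel l (r - 1) with
        | none => simp
        | some p =>
          simp only [Option.map_some, hmax]
          by_cases hc : (2:Int) ∣ c
          · simp [hc, show ¬ (2:Int) ∣ (c + 1) from by omega, add_assoc]
          · simp [hc, show (2:Int) ∣ (c + 1) from by omega, add_assoc]
      · have hmax : max a b = a := by omega
        rw [if_neg hab, if_pos (by omega : a ≥ b), ih (l + 1) r (c + 1)]
        cases playB nums fuel (l + 1) r with
        | none => simp
        | some p =>
          simp only [Option.map_some, hmax]
          by_cases hc : (2:Int) ∣ c
          · simp [hc, show ¬ (2:Int) ∣ (c + 1) from by omega, add_assoc]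
          · simp [hc, show (2:Int) ∣ (c + 1) from by omega, add_assoc]
    · simp only [if_neg hl]
      cases PySem.List.pyGet? nums l <;> simp

-- descendB's stack accumulator factors out
theorem descendB_acc (nums : List Int) (fuel : Nat) :
    ∀ (lo hi : Int) (stack : List Int),
      descendB nums fuel lo hi stack =
        (descendB nums fuel lo hi []).map (fun q => (stack ++ q.1, q.2)) := by
  induction fuel with
  | zero =>
    intro lo hi stack
    rw [descendB, descendB]
    by_cases hl : lo < hi
    · simp [hl]
    · simp only [if_neg hl]
      cases PySem.List.pyGet? nums lo <;> simp
  | succ fuel ih =>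
    intro lo hi stack
    rw [descendB, descendB]
    by_cases hl : lo < hi
    · simp only [if_pos hl]
      cases ha : PySem.List.pyGet? nums lo <;> cases hb : PySem.List.pyGet? nums hi <;> simp
      rename_i a b
      split
      · rw [ih (lo + 1) hi (stack ++ [a]), ih (lo + 1) hi [a]]
        cases descendB nums fuel (lo + 1) hi [] <;> simp
      · rw [ih lo (hi - 1) (stack ++ [b]), ih lo (hi - 1) [b]]
        cases descendB nums fuel lo (hi - 1) [] <;> simp
    · simp only [if_neg hl]
      cases PySem.List.pyGet? nums lo <;> simp

theorem popLoopB_append (a : Int) (l : List Int) (p : Int × Int) :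
    popLoopB (l ++ [a]) p = (a + (popLoopB l p).2, (popLoopB l p).1) := by
  induction l generalizing p with
  | nil => simp [popLoopB]
  | cons c t ih => simp [popLoopB, ih]

-- phase 1 + phase 2 of B compute the role-swapped game value
theorem descendB_pop_eq_playB (nums : List Int) (fuel : Nat) :
    ∀ (lo hi : Int),
      (descendB nums fuel lo hi []).map (fun q => popLoopB q.1.reverse (q.2, 0)) =
        playB nums fuel lo hi := by
  induction fuel with
  | zero =>
    intro lo hi
    rw [descendB, playB]
    by_cases hl : lo < hi
    · simp [hl]
    · simp only [if_neg hl]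
      cases PySem.List.pyGet? nums lo <;> simp [popLoopB]
  | succ fuel ih =>
    intro lo hi
    rw [descendB, playB]
    by_cases hl : lo < hi
    · simp only [if_pos hl]
      cases ha : PySem.List.pyGet? nums lo <;> cases hb : PySem.List.pyGet? nums hi <;> simp
      rename_i a b
      split
      · rw [descendB_acc nums fuel (lo + 1) hi [a], ← ih (lo + 1) hi]
        cases descendB nums fuel (lo + 1) hi [] with
        | none => simp
        | some q => simp [popLoopB_append]
      · rw [descendB_acc nums fuel lo (hi - 1) [b], ← ih lo (hi - 1)]
        cases descendB nums fuel lo (hi - 1) [] with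
        | none => simp
        | some q => simp [popLoopB_append]
    · simp only [if_neg hl]
      cases PySem.List.pyGet? nums lo <;> simp [popLoopB]

-- ===== VERDICT (by name: the statement is the Claim_ definition above) =====
theorem serajaAndDima_spec : Claim_equal_serajaAndDima := by
  intro n nums _ _
  unfold Spec_serajaAndDima serajaAndDima serajaAndDima_alt
  rw [loopA_eq_playB nums (n - 1).toNat 0 (n - 1) 0 0 0,
    ← descendB_pop_eq_playB nums (n - 1).toNat 0 (n - 1)]
  cases descendB nums (n - 1).toNat 0 (n - 1) [] <;> simp
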